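-- pv_equiv track=rewrite | github.com/KangJeongHo1/Craft | 태스크_별_파일/Task_1.py | calculate_cancellations
-- ===== SOURCE A (Python) =====
-- def calculate_cancellations(b601f_row, a301f_data):
--     processing_time = b601f_row[0]
--     ask_prices = b601f_row[1]
--     bid_prices = b601f_row[2]
--     ask_volumes = b601f_row[3]
--     bid_volumes = b601f_row[4]
--
--     total_trade_volume = [0] * 5
--     cancellation_volume = [0] * 5
--
--     used_a301f_rows = set()  # 이미 사용된 A301F 행을 추적 (튜플로 변환)
--
--     for i in range(5):
--         if ask_prices[i] > bid_prices[i]:  # 하락장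
--             for a301f_row in a301f_data:
--                 price = a301f_row[1]
--                 volume = a301f_row[2]
--
--                 if price == bid_prices[i] and tuple(a301f_row) not in used_a301f_rows:  # 체결가가 매수 가격과 동일
--                     total_trade_volume[i] += volume
--                     used_a301f_rows.add(tuple(a301f_row))  # 튜플로 변환하여 추가
--
--             cancellation_volume[i] = ask_volumes[i] - total_trade_volume[i]
--
--         elif bid_prices[i] > ask_prices[i]:  # 상승장
--             for a301f_row in a301f_data:
--                 price = a301f_row[1]
--                 volume = a301f_row[2]
--
--                 if price == ask_prices[i] and tuple(a301f_row) not in used_a301f_rows:  # 체결가가 매도 가격과 동일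
--                     total_trade_volume[i] += volume
--                     used_a301f_rows.add(tuple(a301f_row))  # 튜플로 변환하여 추가
--
--             cancellation_volume[i] = bid_volumes[i] - total_trade_volume[i]
--
--     # 취소 수량이 음수가 될 수 없으므로 0으로 설정
--     cancellation_volume = [max(vol, 0) for vol in cancellation_volume]
--     return cancellation_volume
-- ===== SOURCE B (Python) =====
-- def calculate_cancellations(b601f_row, a301f_data):
--     ask_prices = b601f_row[1]
--     bid_prices = b601f_row[2]
--     ask_volumes = b601f_row[3]
--     bid_volumes = b601f_row[4]
--
--     # One pass: total volume per price over globally-distinct rows.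
--     price_sum = {}
--     seen = set()
--     for row in a301f_data:
--         t = tuple(row)
--         if t not in seen:
--             seen.add(t)
--             price_sum[row[1]] = price_sum.get(row[1], 0) + row[2]
--
--     result = []
--     used_prices = set()
--     for i in range(5):
--         if ask_prices[i] > bid_prices[i]:
--             target, base = bid_prices[i], ask_volumes[i]
--         elif bid_prices[i] > ask_prices[i]:
--             target, base = ask_prices[i], bid_volumes[i]
--         else:
--             result.append(0)
--             continue
--         if target in used_prices:
--             matched = 0
--         else:
--             matched = price_sum.get(target, 0)
--             used_prices.add(target)
--         result.append(max(base - matched, 0))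
--     return result
-- ===== Notes on version B (the rewrite author's own statement) =====
-- stated objective: alternative
-- what changed: A rescans a301f_data once per price level with a used-rows set; B makes a single pass building a price->volume dict over globally-distinct rows plus a used-prices set, then answers each of the 5 levels by one dict lookup.
import Mathlib
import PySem

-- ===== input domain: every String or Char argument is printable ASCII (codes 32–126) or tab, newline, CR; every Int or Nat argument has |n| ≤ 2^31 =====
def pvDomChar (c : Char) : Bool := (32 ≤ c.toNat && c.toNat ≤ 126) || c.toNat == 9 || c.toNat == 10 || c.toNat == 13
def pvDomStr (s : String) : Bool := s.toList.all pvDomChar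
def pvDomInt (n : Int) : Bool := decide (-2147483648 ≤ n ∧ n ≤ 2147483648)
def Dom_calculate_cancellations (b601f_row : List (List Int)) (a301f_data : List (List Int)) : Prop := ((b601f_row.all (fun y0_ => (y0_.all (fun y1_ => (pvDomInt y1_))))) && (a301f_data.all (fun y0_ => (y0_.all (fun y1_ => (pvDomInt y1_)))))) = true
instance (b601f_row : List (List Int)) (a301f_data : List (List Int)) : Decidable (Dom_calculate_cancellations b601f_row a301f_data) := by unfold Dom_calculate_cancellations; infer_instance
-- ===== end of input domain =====

-- B replaces A's five rescans of a301f_data by one pass building a price→volume dict (over globally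
-- distinct rows) plus a used-prices set; equivalence of the two is proved on Pre_ below.

-- row[1] / row[2] of an a301f row, shared accessors of both ports (total form; Pre_ keeps rows long enough)
def pvPrice (row : List Int) : Int := PySem.List.pyGetD row 1 0
def pvVol (row : List Int) : Int := PySem.List.pyGetD row 2 0

-- ===== PORT A =====
-- inner 'for a301f_row in a301f_data' loop of level i with target price p
def pvInnerA (p : Int) (i : Nat) (a : List (List Int)) (tv : List Int)
    (used : PySem.Set (List Int)) : List Int × PySem.Set (List Int) :=
  match a with
  | [] => (tv, used)
  | row :: rest =>
    if pvPrice row = p ∧ row ∉ used then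
      pvInnerA p i rest (tv.set i (tv.getD i 0 + pvVol row)) (PySem.Set.add used row)
    else pvInnerA p i rest tv used

-- body of 'for i in range(5)'
def pvStepA (askP bidP askV bidV : List Int) (a : List (List Int))
    (st : List Int × List Int × PySem.Set (List Int)) (i : Int) :
    List Int × List Int × PySem.Set (List Int) :=
  if PySem.List.pyGetD bidP i 0 < PySem.List.pyGetD askP i 0 then
    let r := pvInnerA (PySem.List.pyGetD bidP i 0) i.toNat a st.1 st.2.2
    (r.1, PySem.List.pySetD st.2.1 i (PySem.List.pyGetD askV i 0 - r.1.getD i.toNat 0), r.2)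
  else if PySem.List.pyGetD askP i 0 < PySem.List.pyGetD bidP i 0 then
    let r := pvInnerA (PySem.List.pyGetD askP i 0) i.toNat a st.1 st.2.2
    (r.1, PySem.List.pySetD st.2.1 i (PySem.List.pyGetD bidV i 0 - r.1.getD i.toNat 0), r.2)
  else st

def calculate_cancellations (b601f_row : List (List Int)) (a301f_data : List (List Int)) : List Int :=
  let ask_prices := PySem.List.pyGetD b601f_row 1 []
  let bid_prices := PySem.List.pyGetD b601f_row 2 []
  let ask_volumes := PySem.List.pyGetD b601f_row 3 []
  let bid_volumes := PySem.List.pyGetD b601f_row 4 []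
  let fin := (PySem.List.pyRange 0 5 1).foldl
    (pvStepA ask_prices bid_prices ask_volumes bid_volumes a301f_data)
    ([0, 0, 0, 0, 0], [0, 0, 0, 0, 0], PySem.Set.empty)
  fin.2.1.map (fun v => max v 0)

-- ===== PORT B =====
-- one pass over a301f_data: volume per price over globally-distinct rows
def pvBuildB (a : List (List Int)) (d : PySem.Dict Int Int) (seen : PySem.Set (List Int)) :
    PySem.Dict Int Int × PySem.Set (List Int) :=
  match a with
  | [] => (d, seen)
  | row :: rest =>
    if row ∈ seen then pvBuildB rest d seen
    else pvBuildB rest (d.insert (pvPrice row) (d.getD (pvPrice row) 0 + pvVol row))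
      (PySem.Set.add seen row)

-- body of B's 'for i in range(5)'
def pvStepB (askP bidP askV bidV : List Int) (d : PySem.Dict Int Int)
    (st : List Int × PySem.Set Int) (i : Int) : List Int × PySem.Set Int :=
  if PySem.List.pyGetD bidP i 0 < PySem.List.pyGetD askP i 0 then
    if PySem.List.pyGetD bidP i 0 ∈ st.2 then
      (st.1 ++ [max (PySem.List.pyGetD askV i 0 - 0) 0], st.2)
    else
      (st.1 ++ [max (PySem.List.pyGetD askV i 0 - d.getD (PySem.List.pyGetD bidP i 0) 0) 0],
        PySem.Set.add st.2 (PySem.List.pyGetD bidP i 0))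
  else if PySem.List.pyGetD askP i 0 < PySem.List.pyGetD bidP i 0 then
    if PySem.List.pyGetD askP i 0 ∈ st.2 then
      (st.1 ++ [max (PySem.List.pyGetD bidV i 0 - 0) 0], st.2)
    else
      (st.1 ++ [max (PySem.List.pyGetD bidV i 0 - d.getD (PySem.List.pyGetD askP i 0) 0) 0],
        PySem.Set.add st.2 (PySem.List.pyGetD askP i 0))
  else (st.1 ++ [0], st.2)

def calculate_cancellations_alt (b601f_row : List (List Int)) (a301f_data : List (List Int)) : List Int :=
  let ask_prices := PySem.List.pyGetD b601f_row 1 []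
  let bid_prices := PySem.List.pyGetD b601f_row 2 []
  let ask_volumes := PySem.List.pyGetD b601f_row 3 []
  let bid_volumes := PySem.List.pyGetD b601f_row 4 []
  let d := (pvBuildB a301f_data PySem.Dict.empty PySem.Set.empty).1
  ((PySem.List.pyRange 0 5 1).foldl
    (pvStepB ask_prices bid_prices ask_volumes bid_volumes d)
    ([], PySem.Set.empty)).1

-- ===== PRECONDITION & SPEC =====
-- Exactly where the Python A returns, except that Pre_ also requires every a301f row to have length ≥ 3
-- even when all five levels tie (A then never indexes the rows and returns, while B's single build pass
-- reads row[1]/row[2] of every row and raises IndexError there).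
def Pre_calculate_cancellations (b601f_row : List (List Int)) (a301f_data : List (List Int)) : Prop :=
  5 ≤ b601f_row.length ∧
  (∀ r ∈ a301f_data, 3 ≤ r.length) ∧
  5 ≤ (b601f_row.getD 1 []).length ∧ 5 ≤ (b601f_row.getD 2 []).length ∧
  (∀ i ∈ [0, 1, 2, 3, 4],
    ((b601f_row.getD 2 []).getD i 0 < (b601f_row.getD 1 []).getD i 0 →
      i < (b601f_row.getD 3 []).length) ∧
    ((b601f_row.getD 1 []).getD i 0 < (b601f_row.getD 2 []).getD i 0 →
      i < (b601f_row.getD 4 []).length))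
instance (b601f_row : List (List Int)) (a301f_data : List (List Int)) : Decidable (Pre_calculate_cancellations b601f_row a301f_data) := by unfold Pre_calculate_cancellations; infer_instance

def pvWitness_calculate_cancellations : List (List Int) × List (List Int) :=
  ([[0], [10, 10, 10, 10, 10], [9, 9, 9, 9, 9], [5, 5, 5, 5, 5], [5, 5, 5, 5, 5]], [[1, 9, 3]])

def Spec_calculate_cancellations (b601f_row : List (List Int)) (a301f_data : List (List Int)) (out : List Int) : Prop := out = calculate_cancellations_alt b601f_row a301f_data
instance (b601f_row : List (List Int)) (a301f_data : List (List Int)) (out : List Int) : Decidable (Spec_calculate_cancellations b601f_row a301f_data out) := by unfold Spec_calculate_cancellations; infer_instance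

-- ===== CLAIM (what is proved, stated in full; the proofs are below) =====
def Claim_equal_calculate_cancellations : Prop := ∀ (b601f_row : List (List Int)) (a301f_data : List (List Int)), Dom_calculate_cancellations b601f_row a301f_data → Pre_calculate_cancellations b601f_row a301f_data → Spec_calculate_cancellations b601f_row a301f_data (calculate_cancellations b601f_row a301f_data)

-- ===== LEMMAS AND PROOFS =====

-- scalar abstraction of A's inner loop: the added volume and the used set
def pvScan (p : Int) (a : List (List Int)) (u : PySem.Set (List Int)) :
    Int × PySem.Set (List Int) :=
  match a with
  | [] => (0, u)
  | row :: rest =>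
    if pvPrice row = p ∧ row ∉ u then
      ((pvVol row) + (pvScan p rest (PySem.Set.add u row)).1,
        (pvScan p rest (PySem.Set.add u row)).2)
    else pvScan p rest u

lemma pv_getD_set_self (l : List Int) (k : Nat) (x : Int) (h : k < l.length) :
    (l.set k x).getD k 0 = x := by
  simp [List.getD_eq_getElem?_getD, h]

lemma pv_getD_set_ne (l : List Int) (k j : Nat) (x : Int) (h : j ≠ k) :
    (l.set k x).getD j 0 = l.getD j 0 := by
  simp [List.getD_eq_getElem?_getD, List.getElem?_set_ne (by omega : k ≠ j)]

lemma pv_take_set_succ (l : List Int) (k : Nat) (x : Int) (h : k < l.length) :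
    (l.set k x).take (k + 1) = l.take k ++ [x] := by
  rw [List.take_add_one]
  rw [List.take_set, List.set_eq_of_length_le (by rw [List.length_take]; exact Nat.min_le_left _ _)]
  simp [h]

lemma pv_take_succ_getD (l : List Int) (k : Nat) (h : k < l.length) :
    l.take (k + 1) = l.take k ++ [l.getD k 0] := by
  rw [List.take_add_one]
  simp [List.getD, List.getElem?_eq_getElem h]

lemma pvInnerA_eq (p : Int) (i : Nat) (a : List (List Int)) :
    ∀ (tv : List Int) (u : PySem.Set (List Int)), i < tv.length →
      pvInnerA p i a tv u =
        (tv.set i (tv.getD i 0 + (pvScan p a u).1), (pvScan p a u).2) := by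
  induction a with
  | nil =>
    intro tv u h
    simp only [pvInnerA, pvScan, add_zero]
    rw [List.getD_eq_getElem tv 0 h]
    exact (congrArg (·, u) (List.set_getElem_self h)).symm
  | cons row rest ih =>
    intro tv u h
    by_cases hc : pvPrice row = p ∧ row ∉ u
    · simp only [pvInnerA, pvScan, if_pos hc]
      rw [ih _ _ (by simpa using h), List.set_set,
        pv_getD_set_self _ _ _ h, add_assoc]
    · simp only [pvInnerA, pvScan, if_neg hc]
      exact ih _ _ h

lemma pvScan_zero (p : Int) (a : List (List Int)) :
    ∀ u, (∀ r ∈ a, pvPrice r = p → r ∈ u) → pvScan p a u = (0, u) := by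
  induction a with
  | nil => intro u _; rfl
  | cons row rest ih =>
    intro u h
    have hc : ¬ (pvPrice row = p ∧ row ∉ u) := fun ⟨hp, hn⟩ => hn (h row (List.mem_cons_self) hp)
    simp only [pvScan, if_neg hc]
    exact ih u (fun r hr hp => h r (List.mem_cons_of_mem _ hr) hp)

lemma pvScan_mem (p : Int) (a : List (List Int)) :
    ∀ u r', r' ∈ (pvScan p a u).2 ↔ r' ∈ u ∨ (r' ∈ a ∧ pvPrice r' = p) := by
  induction a with
  | nil => intro u r'; simp [pvScan]
  | cons row rest ih =>
    intro u r'
    by_cases hc : pvPrice row = p ∧ row ∉ u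
    · simp only [pvScan, if_pos hc]
      rw [ih]
      simp only [PySem.Set.mem_add, List.mem_cons]
      constructor
      · rintro ((h | h) | ⟨h1, h2⟩)
        · exact Or.inl h
        · exact Or.inr ⟨Or.inl h, h ▸ hc.1⟩
        · exact Or.inr ⟨Or.inr h1, h2⟩
      · rintro (h | ⟨(h1 | h1), h2⟩)
        · exact Or.inl (Or.inl h)
        · exact Or.inl (Or.inr h1)
        · exact Or.inr ⟨h1, h2⟩
    · simp only [pvScan, if_neg hc]
      rw [ih]
      push Not at hc
      simp only [List.mem_cons]
      constructor
      · rintro (h | ⟨h1, h2⟩)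
        · exact Or.inl h
        · exact Or.inr ⟨Or.inr h1, h2⟩
      · rintro (h | ⟨(h1 | h1), h2⟩)
        · exact Or.inl h
        · exact Or.inl (h1 ▸ hc (h1 ▸ h2))
        · exact Or.inr ⟨h1, h2⟩

lemma pvBuild_getD (p : Int) (a : List (List Int)) :
    ∀ d seen u, (∀ r, pvPrice r = p → (r ∈ seen ↔ r ∈ u)) →
      (pvBuildB a d seen).1.getD p 0 = d.getD p 0 + (pvScan p a u).1 := by
  induction a with
  | nil => intro d seen u _; simp [pvBuildB, pvScan]
  | cons row rest ih =>
    intro d seen u H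
    by_cases hs : row ∈ seen
    · simp only [pvBuildB, if_pos hs]
      have hscan : pvScan p (row :: rest) u = pvScan p rest u := by
        by_cases hp : pvPrice row = p
        · have hu : row ∈ u := (H row hp).1 hs
          simp [pvScan, hu, hp]
        · simp [pvScan, hp]
      rw [hscan]
      exact ih d seen u H
    · simp only [pvBuildB, if_neg hs]
      by_cases hp : pvPrice row = p
      · have hu : row ∉ u := fun hru => hs ((H row hp).2 hru)
        simp only [pvScan, if_pos (⟨hp, hu⟩ : pvPrice row = p ∧ row ∉ u)]
        rw [ih _ _ (PySem.Set.add u row) ?_]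
        · rw [hp, PySem.Dict.getD_insert_self d p _ 0]; ring
        · intro r hr
          simp only [PySem.Set.mem_add]
          rw [H r hr]
      · have hc : ¬ (pvPrice row = p ∧ row ∉ u) := fun h => hp h.1
        simp only [pvScan, if_neg hc]
        rw [ih _ _ u ?_]
        · rw [PySem.Dict.getD_insert_of_ne d _ _ (fun he : p = pvPrice row => hp he.symm)]
        · intro r hr
          rw [PySem.Set.mem_add]
          constructor
          · rintro (h | h)
            · exact (H r hr).1 h
            · exact absurd (h ▸ hr) hp
          · intro h
            exact Or.inl ((H r hr).2 h)

-- the coupling invariant after the first k levels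
def pvInv (a : List (List Int)) (k : Nat)
    (stA : List Int × List Int × PySem.Set (List Int)) (stB : List Int × PySem.Set Int) : Prop :=
  stA.1.length = 5 ∧ stA.2.1.length = 5 ∧
  stB.1 = (stA.2.1.take k).map (fun v => max v 0) ∧
  (∀ j, k ≤ j → stA.1.getD j 0 = 0) ∧
  (∀ j, k ≤ j → stA.2.1.getD j 0 = 0) ∧
  (∀ r, r ∈ stA.2.2 ↔ r ∈ a ∧ pvPrice r ∈ stB.2)

lemma pvLevel (a : List (List Int)) (k : Nat) (hk : k < 5) (p base : Int)
    (tv cv : List Int) (U : PySem.Set (List Int)) (res : List Int) (P : PySem.Set Int)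
    (hlt : tv.length = 5) (hlc : cv.length = 5)
    (hres : res = (cv.take k).map (fun v => max v 0))
    (htz : ∀ j, k ≤ j → tv.getD j 0 = 0)
    (hcz : ∀ j, k ≤ j → cv.getD j 0 = 0)
    (hU : ∀ r, r ∈ U ↔ r ∈ a ∧ pvPrice r ∈ P) :
    pvInv a (k + 1)
      ((pvInnerA p k a tv U).1,
        cv.set k (base - (pvInnerA p k a tv U).1.getD k 0),
        (pvInnerA p k a tv U).2)
      (if p ∈ P then (res ++ [max (base - 0) 0], P)
       else (res ++ [max (base - (pvBuildB a PySem.Dict.empty PySem.Set.empty).1.getD p 0) 0],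
         PySem.Set.add P p)) := by
  have hklt : k < tv.length := by omega
  have hklc : k < cv.length := by omega
  rw [pvInnerA_eq p k a tv U hklt]
  by_cases hm : p ∈ P
  · rw [if_pos hm]
    have h0 : pvScan p a U = (0, U) := pvScan_zero p a U (fun r hr hp => (hU r).mpr ⟨hr, hp ▸ hm⟩)
    rw [h0]
    have hx : (tv.set k (tv.getD k 0 + (0, U).1)).getD k 0 = 0 := by
      rw [pv_getD_set_self _ _ _ hklt, htz k le_rfl]; rfl
    refine ⟨by simpa using hlt, by simpa using hlc, ?_, ?_, ?_, hU⟩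
    · rw [hx, pv_take_set_succ _ _ _ hklc, List.map_append, ← hres]
      rfl
    · intro j hj
      rw [pv_getD_set_ne _ _ _ _ (by omega)]
      exact htz j (by omega)
    · intro j hj
      rw [pv_getD_set_ne _ _ _ _ (by omega)]
      exact hcz j (by omega)
  · rw [if_neg hm]
    have hd : (pvBuildB a PySem.Dict.empty PySem.Set.empty).1.getD p 0 = (pvScan p a U).1 := by
      rw [pvBuild_getD p a _ _ U ?_]
      · simp [PySem.Dict.getD_empty]
      · intro r hp
        constructor
        · intro h; exact absurd h (List.not_mem_nil)
        · intro h; exact absurd (hp ▸ ((hU r).mp h).2) hm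
    have hx : (tv.set k (tv.getD k 0 + (pvScan p a U).1)).getD k 0 = (pvScan p a U).1 := by
      rw [pv_getD_set_self _ _ _ hklt, htz k le_rfl, zero_add]
    refine ⟨by simpa using hlt, by simpa using hlc, ?_, ?_, ?_, ?_⟩
    · rw [hx, pv_take_set_succ _ _ _ hklc, List.map_append, ← hres, hd]
      rfl
    · intro j hj
      rw [pv_getD_set_ne _ _ _ _ (by omega)]
      exact htz j (by omega)
    · intro j hj
      rw [pv_getD_set_ne _ _ _ _ (by omega)]
      exact hcz j (by omega)
    · intro r
      rw [pvScan_mem]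
      simp only [PySem.Set.mem_add, hU r]
      tauto

lemma pvStep_inv (askP bidP askV bidV : List Int) (a : List (List Int)) (i : Int) (k : Nat)
    (hik : i = (k : Int)) (hk : k < 5)
    (stA : List Int × List Int × PySem.Set (List Int)) (stB : List Int × PySem.Set Int)
    (h : pvInv a k stA stB) :
    pvInv a (k + 1) (pvStepA askP bidP askV bidV a stA i)
      (pvStepB askP bidP askV bidV (pvBuildB a PySem.Dict.empty PySem.Set.empty).1 stB i) := by
  subst hik
  obtain ⟨tv, cv, U⟩ := stA
  obtain ⟨res, P⟩ := stB
  obtain ⟨hlt, hlc, hres, htz, hcz, hU⟩ := h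
  simp only at hlt hlc hres htz hcz hU
  simp only [pvStepA, pvStepB, PySem.List.pyGetD_natCast, PySem.List.pySetD_natCast,
    Int.toNat_natCast]
  by_cases h1 : bidP.getD k 0 < askP.getD k 0
  · rw [if_pos h1, if_pos h1]
    exact pvLevel a k hk _ _ tv cv U res P hlt hlc hres htz hcz hU
  · rw [if_neg h1, if_neg h1]
    by_cases h2 : askP.getD k 0 < bidP.getD k 0
    · rw [if_pos h2, if_pos h2]
      exact pvLevel a k hk _ _ tv cv U res P hlt hlc hres htz hcz hU
    · rw [if_neg h2, if_neg h2]
      refine ⟨hlt, hlc, ?_, fun j hj => htz j (by omega), fun j hj => hcz j (by omega), hU⟩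
      rw [pv_take_succ_getD cv k (by omega), List.map_append, ← hres, hcz k le_rfl]
      rfl

-- ===== VERDICT (by name: the statement is the Claim_ definition above) =====
lemma pvZeros_getD (j : Nat) : List.getD [0, 0, 0, 0, 0] j (0 : Int) = 0 := by
  rcases j with _ | _ | _ | _ | _ | j <;> simp [List.getD]

lemma pvInv_zero (a : List (List Int)) :
    pvInv a 0 ([0, 0, 0, 0, 0], [0, 0, 0, 0, 0], PySem.Set.empty) ([], PySem.Set.empty) := by
  refine ⟨rfl, rfl, rfl, fun j _ => pvZeros_getD j, fun j _ => pvZeros_getD j, fun r => ?_⟩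
  simp [PySem.Set.empty]

theorem calculate_cancellations_spec : Claim_equal_calculate_cancellations := by
  intro b a _ _
  unfold Spec_calculate_cancellations calculate_cancellations calculate_cancellations_alt
  rw [show PySem.List.pyRange 0 5 1 = [0, 1, 2, 3, 4] from rfl]
  simp only [List.foldl_cons, List.foldl_nil]
  have H1 := pvStep_inv (PySem.List.pyGetD b 1 []) (PySem.List.pyGetD b 2 [])
    (PySem.List.pyGetD b 3 []) (PySem.List.pyGetD b 4 []) a 0 0 (by norm_num) (by omega)
    _ _ (pvInv_zero a)
  have H2 := pvStep_inv (PySem.List.pyGetD b 1 []) (PySem.List.pyGetD b 2 [])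
    (PySem.List.pyGetD b 3 []) (PySem.List.pyGetD b 4 []) a 1 1 (by norm_num) (by omega) _ _ H1
  have H3 := pvStep_inv (PySem.List.pyGetD b 1 []) (PySem.List.pyGetD b 2 [])
    (PySem.List.pyGetD b 3 []) (PySem.List.pyGetD b 4 []) a 2 2 (by norm_num) (by omega) _ _ H2
  have H4 := pvStep_inv (PySem.List.pyGetD b 1 []) (PySem.List.pyGetD b 2 [])
    (PySem.List.pyGetD b 3 []) (PySem.List.pyGetD b 4 []) a 3 3 (by norm_num) (by omega) _ _ H3
  have H5 := pvStep_inv (PySem.List.pyGetD b 1 []) (PySem.List.pyGetD b 2 [])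
    (PySem.List.pyGetD b 3 []) (PySem.List.pyGetD b 4 []) a 4 4 (by norm_num) (by omega) _ _ H4
  obtain ⟨_, hlen, hres, _, _, _⟩ := H5

  rw [hres, show (0 + 1 + 1 + 1 + 1 + 1 : Nat) = 5 from rfl, ← hlen, List.take_length]
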